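-- pv_equiv track=rewrite | github.com/kaushik912/code_public | myblog/technical/genai/code-gen-springboot/core/pom_build_error_fixer.py | extract_maven_error
-- ===== SOURCE A (Python) =====
-- def extract_maven_error(log):
--     """Extracts relevant Maven error messages."""
--     error_lines = []
--     capturing = False
--
--     for line in log.split("\n"):
--         if "ERROR" in line or "[ERROR]" in line:
--             capturing = True
--         if capturing:
--             error_lines.append(line)
--
--     return "\n".join(error_lines[-15:])  # Get last 15 error lines
-- ===== SOURCE B (Python) =====
-- def extract_maven_error(log):
--     """Extracts relevant Maven error messages."""
--     lines = log.split("\n")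
--     start = next((i for i, line in enumerate(lines) if "ERROR" in line), None)
--     if start is None:
--         return ""
--     return "\n".join(lines[start:][-15:])
-- ===== Notes on version B (the rewrite author's own statement) =====
-- stated objective: simpler
-- what changed: Replaces A's capturing-flag accumulating loop with a locate-then-slice strategy: find the index of the first line containing 'ERROR' (returning '' if none), then slice lines[start:][-15:] and join; the redundant '[ERROR]' test is dropped since it is subsumed by 'ERROR'.
import Mathlib
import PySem

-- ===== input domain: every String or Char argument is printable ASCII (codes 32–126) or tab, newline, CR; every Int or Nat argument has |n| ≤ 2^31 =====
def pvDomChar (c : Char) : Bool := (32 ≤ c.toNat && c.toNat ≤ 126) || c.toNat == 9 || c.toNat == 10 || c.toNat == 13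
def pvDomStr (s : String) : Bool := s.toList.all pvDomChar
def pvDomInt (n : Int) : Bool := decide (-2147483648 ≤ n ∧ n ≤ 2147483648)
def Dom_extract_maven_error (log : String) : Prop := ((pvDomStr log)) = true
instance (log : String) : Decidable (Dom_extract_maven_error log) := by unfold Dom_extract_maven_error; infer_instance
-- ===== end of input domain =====

-- B changes A's capturing-flag accumulation into locate-first-ERROR-then-slice (simpler; return value only).

-- ===== PORT A =====
-- A's loop body: update (error_lines, capturing) for one line
def pvStepA (st : List String × Bool) (line : String) : List String × Bool :=
  let capturing := if PySem.Str.isIn "ERROR" line || PySem.Str.isIn "[ERROR]" line then true else st.2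
  let error_lines := if capturing then st.1 ++ [line] else st.1
  (error_lines, capturing)

def extract_maven_error (log : String) : String :=
  let st := ((PySem.Str.split? log "\n").getD []).foldl pvStepA ([], false)
  PySem.Str.join "\n" (PySem.List.slice st.1 (some (-15)) none)

-- ===== PORT B =====
-- B's 'next((i for i, line in enumerate(lines) if "ERROR" in line), None)'
def pvFindErr : List String → Int → Option Int
  | [], _ => none
  | l :: ls, i => if PySem.Str.isIn "ERROR" l then some i else pvFindErr ls (i + 1)

def extract_maven_error_alt (log : String) : String :=
  let lines := (PySem.Str.split? log "\n").getD []
  match pvFindErr lines 0 with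
  | none => ""
  | some start =>
      PySem.Str.join "\n"
        (PySem.List.slice (PySem.List.slice lines (some start) none) (some (-15)) none)

-- ===== PRECONDITION & SPEC =====
def Spec_extract_maven_error (log : String) (out : String) : Prop := out = extract_maven_error_alt log
instance (log : String) (out : String) : Decidable (Spec_extract_maven_error log out) := by unfold Spec_extract_maven_error; infer_instance

-- ===== CLAIM (what is proved, stated in full; the proofs are below) =====
def Claim_equal_extract_maven_error : Prop := ∀ (log : String), Dom_extract_maven_error log → Spec_extract_maven_error log (extract_maven_error log)

-- ===== LEMMAS AND PROOFS =====

-- the predicate "line does NOT contain ERROR"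
def pvNoErr (l : String) : Bool := !(PySem.Str.isIn "ERROR" l)

-- "[ERROR]" in line implies "ERROR" in line
lemma pv_sub_err (cs : List Char) (h : PySem.Chars.isIn "[ERROR]".toList cs = true) :
    PySem.Chars.isIn "ERROR".toList cs = true := by
  rw [PySem.Chars.isIn_iff_infix] at h ⊢
  exact List.IsInfix.trans (by decide) h

-- once capturing, A appends every remaining line
lemma pvA_true (ls : List String) (acc : List String) :
    ls.foldl pvStepA (acc, true) = (acc ++ ls, true) := by
  induction ls generalizing acc with
  | nil => simp
  | cons l ls ih => simp [pvStepA, ih]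

-- before capturing, A's accumulated lines are the suffix from the first ERROR line
lemma pvA_false (ls : List String) (acc : List String) :
    (ls.foldl pvStepA (acc, false)).1 = acc ++ ls.dropWhile pvNoErr := by
  induction ls generalizing acc with
  | nil => simp
  | cons l ls ih =>
    by_cases hq : PySem.Chars.isIn "ERROR".toList l.toList = true
    · simp at hq
      simp [pvStepA, hq, pvA_true, pvNoErr]
    · simp at hq
      have hq2 : PySem.Chars.isIn "[ERROR]".toList l.toList = false := by
        by_contra h
        have := pv_sub_err l.toList (by simpa using h)
        simp at this
        simp [this] at hq
      simp at hq2
      simp [pvStepA, hq, hq2, ih, pvNoErr]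

-- if B finds no ERROR line, dropWhile drops everything
lemma pvB_none (ls : List String) (n : Int) (h : pvFindErr ls n = none) :
    ls.dropWhile pvNoErr = [] := by
  induction ls generalizing n with
  | nil => simp
  | cons l ls ih =>
    by_cases hq : PySem.Chars.isIn "ERROR".toList l.toList = true
    · simp at hq
      simp [pvFindErr, hq] at h
    · simp at hq
      simp [pvFindErr, hq] at h
      simp [pvNoErr, hq, ih _ h]

-- if B finds index i (starting the count at n), the drop from i-n is the dropWhile suffix
lemma pvB_some (ls : List String) (n : Nat) (i : Int) (h : pvFindErr ls (n : Int) = some i) :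
    ∃ k : Nat, i = ((n + k : Nat) : Int) ∧ ls.drop k = ls.dropWhile pvNoErr := by
  induction ls generalizing n i with
  | nil => simp [pvFindErr] at h
  | cons l ls ih =>
    by_cases hq : PySem.Chars.isIn "ERROR".toList l.toList = true
    · simp at hq
      simp [pvFindErr, hq] at h
      exact ⟨0, by omega, by simp [pvNoErr, hq]⟩
    · simp at hq
      simp [pvFindErr, hq] at h
      have h' : pvFindErr ls ((n + 1 : Nat) : Int) = some i := by
        rw [show ((n + 1 : Nat) : Int) = (n : Int) + 1 by push_cast; ring]; exact h
      obtain ⟨k, hk, hd⟩ := ih (n + 1) i h'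
      exact ⟨k + 1, by omega, by simp [pvNoErr, hq, hd]⟩

-- ===== VERDICT (by name: the statement is the Claim_ definition above) =====
theorem extract_maven_error_spec : Claim_equal_extract_maven_error := by
  intro log _
  unfold Spec_extract_maven_error extract_maven_error extract_maven_error_alt
  set ls := (PySem.Str.split? log "\n").getD [] with hls
  have hA : (ls.foldl pvStepA ([], false)).1 = ls.dropWhile pvNoErr := by
    simpa using pvA_false ls []
  cases hfe : pvFindErr ls 0 with
  | none =>
      simp only [hA, pvB_none ls 0 hfe, hfe]
      simp [PySem.List.slice, PySem.Str.join, PySem.Chars.join, List.intercalate]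
  | some i =>
      obtain ⟨k, hk, hd⟩ := pvB_some ls 0 i (by simpa using hfe)
      simp only [hA, ← hd, hk, hfe]
      rw [PySem.List.slice_from ls (Int.natCast_nonneg _)]
      simp
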